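-- pv_equiv track=rewrite | github.com/PolyArch/loom | tests/unit/extmemory-tagged-map-hierarchy/check.py | decode_temporal_sw_slice
-- ===== SOURCE A (Python) =====
-- def read_bits(words: list[int], offset: int, width: int) -> int:
--     value = 0
--     for bit in range(width):
--         word_index = (offset + bit) // 32
--         bit_index = (offset + bit) % 32
--         if word_index < len(words) and ((words[word_index] >> bit_index) & 1):
--             value |= 1 << bit
--     return value
--
-- def decode_temporal_sw_slice(config: dict, entry: dict, tag_width: int, route_bits: int) -> dict[int, int]:
--     words = config["words"][entry["word_offset"]:entry["word_offset"] + entry["word_count"]]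
--     entries: dict[int, int] = {}
--     bit_pos = 0
--     for _ in range(2):
--         valid = read_bits(words, bit_pos, 1)
--         bit_pos += 1
--         tag = read_bits(words, bit_pos, tag_width)
--         bit_pos += tag_width
--         route_mask = read_bits(words, bit_pos, route_bits)
--         bit_pos += route_bits
--         if valid:
--             entries[tag] = route_mask
--     return entries
-- ===== SOURCE B (Python) =====
-- def decode_temporal_sw_slice(config: dict, entry: dict, tag_width: int, route_bits: int) -> dict[int, int]:
--     off = entry["word_offset"]
--     words = config["words"][off:off + entry["word_count"]]
--     total = sum((w & 0xFFFFFFFF) << (32 * i) for i, w in enumerate(words))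
--     entries: dict[int, int] = {}
--     step = 1 + tag_width + route_bits
--     for k in range(2):
--         base = k * step
--         if (total >> base) & 1:
--             tag = (total >> (base + 1)) & ((1 << tag_width) - 1)
--             entries[tag] = (total >> (base + 1 + tag_width)) & ((1 << route_bits) - 1)
--     return entries
-- ===== Notes on version B (the rewrite author's own statement) =====
-- stated objective: alternative
-- what changed: B packs the sliced words into one little-endian integer and extracts each valid/tag/route_mask field by a closed-form shift-and-mask, replacing A's read_bits loop that tests and ORs one bit at a time; Pre_ excludes missing dict keys (A raises KeyError) and negative tag_width/route_bits, where B's natural `1 << width` raises ValueError (A returns a value there only via Python's negative-index wraparound reads).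
import Mathlib
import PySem

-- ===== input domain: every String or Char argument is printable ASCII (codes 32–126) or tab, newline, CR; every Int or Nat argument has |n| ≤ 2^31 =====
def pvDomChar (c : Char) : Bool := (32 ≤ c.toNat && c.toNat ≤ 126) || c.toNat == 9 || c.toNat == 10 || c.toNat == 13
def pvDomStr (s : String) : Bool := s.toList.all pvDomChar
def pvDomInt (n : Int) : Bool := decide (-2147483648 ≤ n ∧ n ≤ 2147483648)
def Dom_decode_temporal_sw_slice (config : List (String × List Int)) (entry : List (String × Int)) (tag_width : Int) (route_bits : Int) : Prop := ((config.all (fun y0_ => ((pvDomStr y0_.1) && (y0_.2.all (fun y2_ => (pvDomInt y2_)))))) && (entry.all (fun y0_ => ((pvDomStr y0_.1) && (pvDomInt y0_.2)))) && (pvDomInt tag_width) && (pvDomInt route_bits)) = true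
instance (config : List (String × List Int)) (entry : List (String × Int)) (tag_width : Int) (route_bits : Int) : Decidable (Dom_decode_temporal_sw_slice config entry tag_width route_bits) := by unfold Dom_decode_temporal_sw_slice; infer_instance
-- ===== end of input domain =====

-- B replaces the bit-by-bit read_bits accumulation with one packed little-endian
-- integer built from the 32-bit words, from which each field is a single shift-and-mask.

-- ===== PORT A =====
-- read_bits: bit-by-bit accumulation, exactly A's loop over range(width)
def pvReadBits (words : List Int) (offset : Int) (width : Int) : Int :=
  (PySem.List.pyRange 0 width 1).foldl (fun value bit =>
    let word_index := PySem.Int.floordiv (offset + bit) 32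
    let bit_index := PySem.Int.mod (offset + bit) 32
    -- bit_index = (offset+bit) % 32 ≥ 0, so `.toNat` is exact for Python's `>>`
    if word_index < (words.length : Int) ∧
        PySem.Int.band (PySem.List.pyGetD words word_index 0 >>> bit_index.toNat) 1 ≠ 0 then
      PySem.Int.bor value (1 <<< bit.toNat)
    else value) 0

def decode_temporal_sw_slice (config : List (String × List Int)) (entry : List (String × Int)) (tag_width : Int) (route_bits : Int) : List (Int × Int) :=
  let woff := (PySem.Dict.mk entry).getD "word_offset" 0
  let words := PySem.List.slice ((PySem.Dict.mk config).getD "words" []) (some woff)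
      (some (woff + (PySem.Dict.mk entry).getD "word_count" 0))
  (((PySem.List.pyRange 0 2 1).foldl (fun (st : PySem.Dict Int Int × Int) _ =>
      let valid := pvReadBits words st.2 1
      let bp1 := st.2 + 1
      let tag := pvReadBits words bp1 tag_width
      let bp2 := bp1 + tag_width
      let route_mask := pvReadBits words bp2 route_bits
      let bp3 := bp2 + route_bits
      (if valid ≠ 0 then st.1.insert tag route_mask else st.1, bp3))
    (PySem.Dict.empty, 0)).1).items

-- ===== PORT B =====
-- total = sum((w & 0xFFFFFFFF) << (32*i) for i, w in enumerate(words))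
def pvTotalOf (words : List Int) : Int :=
  (PySem.List.enumerate words 0).foldl
    (fun acc iw => acc + (PySem.Int.band iw.2 4294967295 <<< (32 * iw.1).toNat)) 0

def decode_temporal_sw_slice_alt (config : List (String × List Int)) (entry : List (String × Int)) (tag_width : Int) (route_bits : Int) : List (Int × Int) :=
  let woff := (PySem.Dict.mk entry).getD "word_offset" 0
  let words := PySem.List.slice ((PySem.Dict.mk config).getD "words" []) (some woff)
      (some (woff + (PySem.Dict.mk entry).getD "word_count" 0))
  let total := pvTotalOf words
  let stp := 1 + tag_width + route_bits
  -- all shift amounts are ≥ 0 under Pre_, so `.toNat` is exact for Python's `>>`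
  ((PySem.List.pyRange 0 2 1).foldl (fun (entries : PySem.Dict Int Int) k =>
      let base := k * stp
      if PySem.Int.band (total >>> base.toNat) 1 ≠ 0 then
        let tag := PySem.Int.band (total >>> (base + 1).toNat) ((1 <<< tag_width.toNat) - 1)
        entries.insert tag
          (PySem.Int.band (total >>> (base + 1 + tag_width).toNat) ((1 <<< route_bits.toNat) - 1))
      else entries)
    PySem.Dict.empty).items

-- ===== PRECONDITION & SPEC =====
-- Pre_ excludes (a) missing "words"/"word_offset"/"word_count" keys, on which A raises
-- KeyError, and (b) negative tag_width or route_bits, on which B's natural `1 << width`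
-- raises ValueError (A only returns there via Python's negative-index wraparound reads).
def Pre_decode_temporal_sw_slice (config : List (String × List Int)) (entry : List (String × Int)) (tag_width : Int) (route_bits : Int) : Prop :=
  (PySem.Dict.mk config).contains "words" = true ∧
  (PySem.Dict.mk entry).contains "word_offset" = true ∧
  (PySem.Dict.mk entry).contains "word_count" = true ∧
  0 ≤ tag_width ∧ 0 ≤ route_bits
instance (config : List (String × List Int)) (entry : List (String × Int)) (tag_width : Int) (route_bits : Int) : Decidable (Pre_decode_temporal_sw_slice config entry tag_width route_bits) := by unfold Pre_decode_temporal_sw_slice; infer_instance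

def pvWitness_decode_temporal_sw_slice : (List (String × List Int)) × (List (String × Int)) × Int × Int :=
  ([("words", [1743, 5])], [("word_offset", 0), ("word_count", 2)], 2, 3)

def Spec_decode_temporal_sw_slice (config : List (String × List Int)) (entry : List (String × Int)) (tag_width : Int) (route_bits : Int) (out : List (Int × Int)) : Prop := out = decode_temporal_sw_slice_alt config entry tag_width route_bits
instance (config : List (String × List Int)) (entry : List (String × Int)) (tag_width : Int) (route_bits : Int) (out : List (Int × Int)) : Decidable (Spec_decode_temporal_sw_slice config entry tag_width route_bits out) := by unfold Spec_decode_temporal_sw_slice; infer_instance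

-- ===== CLAIM (what is proved, stated in full; the proofs are below) =====
def Claim_equal_decode_temporal_sw_slice : Prop := ∀ (config : List (String × List Int)) (entry : List (String × Int)) (tag_width : Int) (route_bits : Int), Dom_decode_temporal_sw_slice config entry tag_width route_bits → Pre_decode_temporal_sw_slice config entry tag_width route_bits → Spec_decode_temporal_sw_slice config entry tag_width route_bits (decode_temporal_sw_slice config entry tag_width route_bits)

-- ===== LEMMAS AND PROOFS =====

-- low 32 bits of a word, as Python's `w & 0xFFFFFFFF`
def pvU (w : Int) : Nat := (PySem.Int.band w 4294967295).toNat
def pvUWords (ws : List Int) : List Nat := ws.map pvU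
def pvNatTotal : List Nat → Nat
  | [] => 0
  | u :: tl => u + 4294967296 * pvNatTotal tl
-- bit j of the packed word stream
def pvStream (l : List Nat) (j : Nat) : Bool := (l.getD (j / 32) 0).testBit (j % 32)
-- reference value of read_bits, over Nat
def pvReadN (l : List Nat) (o : Nat) : Nat → Nat
  | 0 => 0
  | n + 1 => pvReadN l o n + (if pvStream l (o + n) then 2 ^ n else 0)

lemma pv_band_mask (w : Int) : PySem.Int.band w 4294967295 = w % 4294967296 := by
  have h2 : ∀ x : Nat, x &&& 4294967295 = x % 4294967296 := fun x => by
    have := Nat.and_two_pow_sub_one_eq_mod x 32; norm_num at this; exact this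
  unfold PySem.Int.band
  norm_num
  rw [show Int.toNat 4294967295 = 4294967295 from rfl]
  split
  · rw [h2]; omega
  · rw [Nat.and_comm, h2]; omega

lemma pvU_cast (w : Int) : (pvU w : Int) = w % 4294967296 := by
  rw [pvU, pv_band_mask, Int.toNat_of_nonneg (Int.emod_nonneg w (by norm_num))]

lemma pvU_lt (w : Int) : pvU w < 2 ^ 32 := by
  have := pvU_cast w
  have h := Int.emod_lt_of_pos w (show (0:Int) < 4294967296 by norm_num)
  omega

lemma pv_lor (v n : Nat) (h : v < 2 ^ n) : v ||| 2 ^ n = v + 2 ^ n := by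
  apply Nat.eq_of_testBit_eq; intro i
  rw [Nat.testBit_or, show v + 2 ^ n = 2 ^ n * 1 + v by ring,
    Nat.testBit_two_pow_mul_add 1 h]
  rcases lt_trichotomy i n with hi | hi | hi
  · simp [hi, Nat.testBit_two_pow]; omega
  · subst hi; simp [Nat.testBit_lt_two_pow h]
  · have h1 : v.testBit i = false :=
      Nat.testBit_lt_two_pow (lt_of_lt_of_le h (Nat.pow_le_pow_right (by norm_num) hi.le))
    have h2 : (1 : Nat).testBit (i - n) = false := by
      rw [show (1:Nat) = 2 ^ 0 by norm_num, Nat.testBit_two_pow]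
      simp; omega
    simp [h1, h2, Nat.testBit_two_pow]
    omega

lemma pvReadN_lt (l : List Nat) (o n : Nat) : pvReadN l o n < 2 ^ n := by
  induction n with
  | zero => simp [pvReadN]
  | succ n ih =>
    have h : 2 ^ (n + 1) = 2 * 2 ^ n := by ring
    simp only [pvReadN]; split <;> omega

lemma pvReadN_testBit (l : List Nat) (o n b : Nat) :
    (pvReadN l o n).testBit b = (decide (b < n) && pvStream l (o + b)) := by
  induction n with
  | zero => simp [pvReadN, Nat.zero_testBit]
  | succ n ih =>
    simp only [pvReadN]
    by_cases hs : pvStream l (o + n)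
    · rw [if_pos hs, ← pv_lor _ _ (pvReadN_lt l o n), Nat.testBit_or, ih,
        Nat.testBit_two_pow]
      rcases lt_trichotomy b n with hb | hb | hb
      · simp [hb, Nat.lt_succ_of_lt hb]; omega
      · subst hb; simp [hs]
      · have : ¬ b < n + 1 := by omega
        simp [hb.ne, this]; omega
    · rw [if_neg hs, add_zero, ih]
      rcases lt_trichotomy b n with hb | hb | hb
      · simp [hb, Nat.lt_succ_of_lt hb]
      · subst hb; simp [hs]
      · have h1 : ¬ b < n := by omega
        have h2 : ¬ b < n + 1 := by omega
        simp [h1, h2]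

lemma pvNatTotal_testBit (l : List Nat) (hl : ∀ u ∈ l, u < 2 ^ 32) (j : Nat) :
    (pvNatTotal l).testBit j = pvStream l j := by
  induction l generalizing j with
  | nil => simp [pvNatTotal, pvStream, Nat.zero_testBit]
  | cons u tl ih =>
    have hu : u < 2 ^ 32 := hl u (List.mem_cons_self)
    rw [show pvNatTotal (u :: tl) = 2 ^ 32 * pvNatTotal tl + u by rw [pvNatTotal]; ring,
      Nat.testBit_two_pow_mul_add _ hu]
    by_cases hj : j < 32
    · rw [if_pos hj]
      simp [pvStream, Nat.div_eq_of_lt hj, Nat.mod_eq_of_lt hj]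
    · rw [if_neg hj, ih (fun u hu' => hl u (List.mem_cons_of_mem _ hu'))]
      have h1 : j / 32 = (j - 32) / 32 + 1 := by omega
      have h2 : (j - 32) % 32 = j % 32 := by omega
      simp [pvStream, h1, h2]

lemma pv_bit_test (w : Int) (b : Nat) (hb : b < 32) :
    (PySem.Int.band (w >>> b) 1 ≠ 0) ↔ (pvU w).testBit b = true := by
  rw [PySem.Int.band_one, PySem.Int.mod_eq_emod_of_pos (by norm_num),
    Int.shiftRight_eq_div_pow, Nat.testBit_eq_decide_div_mod_eq, pvU, pv_band_mask]
  interval_cases b <;> (norm_num; omega)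

lemma pvUWords_lt (ws : List Int) : ∀ u ∈ pvUWords ws, u < 2 ^ 32 := by
  intro u hu
  simp only [pvUWords, List.mem_map] at hu
  obtain ⟨w, -, rfl⟩ := hu
  exact pvU_lt w

lemma pv_cond (words : List Int) (j : Nat) :
    ((((j / 32 : Nat) : Int) < (words.length : Int)) ∧
      PySem.Int.band (PySem.List.pyGetD words ((j / 32 : Nat) : Int) 0 >>> ((j % 32 : Nat) : Int).toNat) 1 ≠ 0)
    ↔ pvStream (pvUWords words) j = true := by
  rw [PySem.List.pyGetD_natCast, Int.toNat_natCast, Nat.cast_lt]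
  by_cases hlen : j / 32 < words.length
  · have hget : words.getD (j / 32) 0 = words[j / 32] := List.getD_eq_getElem words 0 hlen
    have hgetU : (pvUWords words).getD (j / 32) 0 = pvU (words[j / 32]) := by
      rw [pvUWords, List.getD_eq_getElem _ 0 (by simpa [pvUWords] using hlen), List.getElem_map]
    rw [pvStream, hgetU, hget]
    have := pv_bit_test (words[j/32]) (j % 32) (Nat.mod_lt _ (by norm_num))
    constructor
    · rintro ⟨-, h⟩; exact this.mp h
    · intro h; exact ⟨hlen, this.mpr h⟩
  · have : (pvUWords words).getD (j / 32) 0 = 0 := by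
      apply List.getD_eq_default
      simpa [pvUWords] using not_lt.mp hlen
    rw [pvStream, this]
    simp [Nat.zero_testBit, hlen]

lemma pvReadBits_eq_readN (words : List Int) (off : Int) (hoff : 0 ≤ off) (n : Nat) :
    pvReadBits words off (n : Int) = (pvReadN (pvUWords words) off.toNat n : Int) := by
  induction n with
  | zero =>
    simp [pvReadBits, pvReadN, PySem.List.pyRange_one_eq_nil (by norm_num : (0:Int) ≤ 0)]
  | succ n ih =>
    simp only [pvReadBits] at ih ⊢
    rw [show ((n + 1 : Nat) : Int) = (n : Int) + 1 by push_cast; ring,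
      PySem.List.pyRange_one_succ_right (Int.natCast_nonneg n), List.foldl_append,
      List.foldl_cons, List.foldl_nil, ih]
    have hcast : off + (n : Int) = ((off.toNat + n : Nat) : Int) := by omega
    have hdiv : PySem.Int.floordiv ((off.toNat + n : Nat) : Int) 32 = (((off.toNat + n) / 32 : Nat) : Int) := by
      exact_mod_cast PySem.Int.floordiv_natCast (off.toNat + n) 32
    have hmod : PySem.Int.mod ((off.toNat + n : Nat) : Int) 32 = (((off.toNat + n) % 32 : Nat) : Int) := by
      exact_mod_cast PySem.Int.mod_natCast (off.toNat + n) 32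
    rw [hcast, hdiv, hmod]
    by_cases hs : pvStream (pvUWords words) (off.toNat + n) = true
    · rw [if_pos ((pv_cond words (off.toNat + n)).mpr hs)]
      rw [Int.toNat_natCast, PySem.Int.bor_natCast, Nat.shiftLeft_eq, one_mul,
        pv_lor _ _ (pvReadN_lt (pvUWords words) off.toNat n)]
      simp [pvReadN, hs]
    · rw [if_neg (fun hc => hs ((pv_cond words (off.toNat + n)).mp hc))]
      simp only [pvReadN, hs, Bool.false_eq_true, reduceIte, add_zero]

lemma pvTotalOf_aux (ws : List Int) : ∀ (i : Nat) (acc : Int),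
    (PySem.List.enumerate ws (i : Int)).foldl
      (fun acc iw => acc + (PySem.Int.band iw.2 4294967295 <<< (32 * iw.1).toNat)) acc
    = acc + (2 ^ (32 * i) * pvNatTotal (pvUWords ws) : Nat) := by
  induction ws with
  | nil => intro i acc; simp [PySem.List.enumerate_nil, pvUWords, pvNatTotal]
  | cons w tl ih =>
    intro i acc
    rw [PySem.List.enumerate_cons, List.foldl_cons,
      show ((i : Int) + 1) = ((i + 1 : Nat) : Int) by push_cast; ring, ih]
    have hsh : ((32 : Int) * (i : Int)).toNat = 32 * i := by omega
    have hband : PySem.Int.band w 4294967295 = ((pvU w : Nat) : Int) := by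
      rw [pvU_cast, pv_band_mask]
    rw [hsh, hband, Int.shiftLeft_natCast_right,
      show ((pvU w : Nat) : Int) <<< (32 * i) = ((pvU w <<< (32 * i) : Nat) : Int) from (Int.natCast_shiftLeft _ _).symm]
    have : pvNatTotal (pvUWords (w :: tl)) = pvU w + 4294967296 * pvNatTotal (pvUWords tl) := rfl
    rw [this]
    push_cast [Nat.shiftLeft_eq]
    rw [show (4294967296 : Int) = 2 ^ 32 by norm_num,
      show 32 * (i + 1) = 32 * i + 32 by ring, pow_add]
    ring

lemma pvTotalOf_eq (ws : List Int) : pvTotalOf ws = (pvNatTotal (pvUWords ws) : Int) := by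
  have := pvTotalOf_aux ws 0 0
  simpa [pvTotalOf] using this

lemma pv_field (l : List Nat) (hl : ∀ u ∈ l, u < 2 ^ 32) (o n : Nat) :
    PySem.Int.band ((pvNatTotal l : Int) >>> o) ((1 <<< n) - 1) = (pvReadN l o n : Int) := by
  rw [show ((pvNatTotal l : Int) >>> o) = ((pvNatTotal l >>> o : Nat) : Int) from (Int.natCast_shiftRight _ _).symm,
    show ((1 <<< n : Nat) : Int) - 1 = ((2 ^ n - 1 : Nat) : Int) by rw [Nat.shiftLeft_eq]; push_cast [Nat.one_le_two_pow]; ring,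
    PySem.Int.band_natCast, Nat.and_two_pow_sub_one_eq_mod]
  congr 1
  apply Nat.eq_of_testBit_eq
  intro b
  rw [Nat.testBit_mod_two_pow, Nat.testBit_shiftRight, pvNatTotal_testBit l hl,
    pvReadN_testBit]

lemma pv_main (words : List Int) (o w : Int) (ho : 0 ≤ o) :
    pvReadBits words o w = PySem.Int.band (pvTotalOf words >>> o.toNat) ((1 <<< w.toNat) - 1) := by
  by_cases hw : 0 ≤ w
  · rw [show w = ((w.toNat : Nat) : Int) by omega, pvReadBits_eq_readN words o ho,
      pvTotalOf_eq, pv_field (pvUWords words) (pvUWords_lt words), Int.toNat_natCast]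
  · have h1 : pvReadBits words o w = 0 := by
      rw [pvReadBits, PySem.List.pyRange_one_eq_nil (by omega), List.foldl_nil]
    have h2 : w.toNat = 0 := by omega
    rw [h1, h2]
    norm_num

-- ===== VERDICT (by name: the statement is the Claim_ definition above) =====
theorem decode_temporal_sw_slice_spec : Claim_equal_decode_temporal_sw_slice := by
  intro config entry tag_width route_bits _ hpre
  obtain ⟨-, -, -, htw, hrb⟩ := hpre
  unfold Spec_decode_temporal_sw_slice
  rw [decode_temporal_sw_slice, decode_temporal_sw_slice_alt]
  have hR : PySem.List.pyRange 0 2 1 = [0, 1] := by decide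
  rw [hR]
  simp only [List.foldl_cons, List.foldl_nil]
  set W := PySem.List.slice ((PySem.Dict.mk config).getD "words" [])
      (some ((PySem.Dict.mk entry).getD "word_offset" 0))
      (some ((PySem.Dict.mk entry).getD "word_offset" 0 + (PySem.Dict.mk entry).getD "word_count" 0)) with hWdef
  have key : ∀ oA oB : Int, oA = oB → 0 ≤ oA → ∀ w : Int,
      pvReadBits W oA w = PySem.Int.band (pvTotalOf W >>> oB.toNat) ((1 <<< w.toNat : Nat) - 1 : Int) := by
    rintro oA oB rfl h w
    have := pv_main W oA w h
    push_cast at this ⊢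
    exact this
  have keyv : ∀ oA oB : Int, oA = oB → 0 ≤ oA →
      pvReadBits W oA 1 = PySem.Int.band (pvTotalOf W >>> oB.toNat) 1 := by
    rintro oA oB rfl h
    rw [pv_main W oA 1 h]
    norm_num [Int.shiftLeft_eq]
  rw [← keyv 0 (0 * (1 + tag_width + route_bits)) (by ring) le_rfl,
    ← keyv (0 + 1 + tag_width + route_bits) (1 * (1 + tag_width + route_bits)) (by ring) (by omega),
    ← key (0 + 1) (0 * (1 + tag_width + route_bits) + 1) (by ring) (by omega) tag_width,
    ← key (0 + 1 + tag_width) (0 * (1 + tag_width + route_bits) + 1 + tag_width) (by ring) (by omega) route_bits,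
    ← key (0 + 1 + tag_width + route_bits + 1) (1 * (1 + tag_width + route_bits) + 1) (by ring) (by omega) tag_width,
    ← key (0 + 1 + tag_width + route_bits + 1 + tag_width) (1 * (1 + tag_width + route_bits) + 1 + tag_width) (by ring) (by omega) route_bits]
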